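-- pv_equiv track=rewrite | github.com/jazpenn/parkserver | park/strutil.py | int2ukey
-- ===== SOURCE A (Python) =====
-- def int2ukey(uint):
--     ukey = ''
--     for i in range(6):
--         uint, remainder = divmod(uint, 36)
--         if remainder < 10:
--             ukey = chr(remainder + 48) + ukey
--         else:
--             ukey = chr(remainder + 97 - 10) + ukey
--     return ukey
-- ===== SOURCE B (Python) =====
-- _ALPHABET = '0123456789abcdefghijklmnopqrstuvwxyz'
--
-- def int2ukey(uint):
--     return ''.join(_ALPHABET[(uint // 36 ** i) % 36] for i in reversed(range(6)))
-- ===== Notes on version B (the rewrite author's own statement) =====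
-- stated objective: idiomatic
-- what changed: Replaces the sequential divmod loop threading the quotient with independent positional extraction: each of the 6 base-36 digits is computed as (uint // 36**i) % 36 and mapped through an alphabet lookup string, assembled with join.
import Mathlib
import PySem

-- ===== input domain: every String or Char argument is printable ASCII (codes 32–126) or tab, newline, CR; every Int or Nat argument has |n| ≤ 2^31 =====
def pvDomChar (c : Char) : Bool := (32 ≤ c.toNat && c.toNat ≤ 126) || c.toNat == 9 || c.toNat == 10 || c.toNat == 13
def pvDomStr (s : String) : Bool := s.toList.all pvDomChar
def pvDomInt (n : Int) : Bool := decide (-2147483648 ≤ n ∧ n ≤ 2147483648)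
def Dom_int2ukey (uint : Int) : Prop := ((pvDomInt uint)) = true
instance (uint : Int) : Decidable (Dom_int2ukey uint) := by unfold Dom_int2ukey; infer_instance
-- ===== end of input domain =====

-- B computes each base-36 digit independently by positional weight and looks it up
-- in an alphabet string, instead of A's sequential divmod reduction (objective: idiomatic).

-- ===== PORT A =====
-- A threads (uint, ukey) through 6 iterations, dividing by 36 and prepending the digit's char.
def int2ukey (uint : Int) : String :=
  let st := (PySem.List.pyRange 0 6 1).foldl
    (fun (st : Int × List Char) _ =>
      let q := PySem.Int.floordiv st.1 36
      let r := PySem.Int.mod st.1 36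
      -- chr(r+48) / chr(r+97-10): r ∈ [0,36) so Char.ofNat is exact here
      (q, (if r < 10 then Char.ofNat (r + 48).toNat
           else Char.ofNat (r + 97 - 10).toNat) :: st.2))
    (uint, [])
  String.mk st.2

-- ===== PORT B =====
def pvAlphabet : List Char := "0123456789abcdefghijklmnopqrstuvwxyz".toList

def int2ukey_alt (uint : Int) : String :=
  String.mk (((List.range 6).reverse).map fun i =>
    pvAlphabet.getD (PySem.Int.mod (PySem.Int.floordiv uint (36 ^ i)) 36).toNat ' ')

-- ===== PRECONDITION & SPEC =====
def Spec_int2ukey (uint : Int) (out : String) : Prop := out = int2ukey_alt uint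
instance (uint : Int) (out : String) : Decidable (Spec_int2ukey uint out) := by unfold Spec_int2ukey; infer_instance

-- ===== CLAIM (what is proved, stated in full; the proofs are below) =====
def Claim_equal_int2ukey : Prop := ∀ (uint : Int), Dom_int2ukey uint → Spec_int2ukey uint (int2ukey uint)

-- ===== LEMMAS AND PROOFS =====

-- the conditional char A builds for the digit (mod v 36) is exactly B's alphabet lookup
theorem pv_digit_char (v : Int) :
    (if PySem.Int.mod v 36 < 10 then Char.ofNat (PySem.Int.mod v 36 + 48).toNat
     else Char.ofNat (PySem.Int.mod v 36 + 97 - 10).toNat)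
      = pvAlphabet.getD (PySem.Int.mod v 36).toNat ' ' := by
  have h0 : 0 ≤ PySem.Int.mod v 36 := PySem.Int.mod_nonneg v (by norm_num)
  have h36 : PySem.Int.mod v 36 < 36 := PySem.Int.mod_lt v (by norm_num)
  generalize PySem.Int.mod v 36 = r at *
  interval_cases r <;> decide

-- dividing the running quotient by 36 once more is dividing uint by the next power
theorem pv_fdiv_step (u : Int) (i : Nat) :
    PySem.Int.floordiv (PySem.Int.floordiv u ((36:Int) ^ i)) 36
      = PySem.Int.floordiv u ((36:Int) ^ (i + 1)) := by
  rw [PySem.Int.floordiv_eq_ediv_of_pos (a := PySem.Int.floordiv u ((36:Int) ^ i)) (by norm_num),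
      PySem.Int.floordiv_eq_ediv_of_pos (b := (36:Int) ^ i) (by positivity),
      PySem.Int.floordiv_eq_ediv_of_pos (b := (36:Int) ^ (i + 1)) (by positivity), pow_succ]
  exact Int.ediv_ediv_of_nonneg (by positivity)

theorem int2ukey_spec : Claim_equal_int2ukey := by
  intro uint _
  unfold Spec_int2ukey int2ukey int2ukey_alt
  have hr : PySem.List.pyRange 0 6 1 = ([0, 1, 2, 3, 4, 5] : List Int) := by decide
  have hR : (List.range 6).reverse = [5, 4, 3, 2, 1, 0] := by decide
  rw [hr, hR]
  simp only [List.foldl, List.map]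
  have h0 : uint = PySem.Int.floordiv uint ((36:Int) ^ 0) := by
    rw [pow_zero, PySem.Int.floordiv_eq_ediv_of_pos (b := (1:Int)) (by norm_num), Int.ediv_one]
  conv_lhs => rw [h0]
  rw [pv_fdiv_step, pv_fdiv_step, pv_fdiv_step, pv_fdiv_step, pv_fdiv_step]
  rw [pv_digit_char, pv_digit_char, pv_digit_char, pv_digit_char, pv_digit_char, pv_digit_char]
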